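-- pv_equiv track=rewrite | github.com/fergusleen/Amshole | tools/build_frames.py | clip_visible
-- ===== SOURCE A (Python) =====
-- LINE_WIDTH = 38
--
-- ZERO_TOKENS = {
--     '[R]', '[G]', '[Y]', '[B]', '[M]', '[C]', '[W]', '[F]', '[S]', '[N]', '[D]', '[-]', '[n]',
--     '[r]', '[g]', '[y]', '[b]', '[m]', '[c]', '[w]', '[h.]', '[m.]', '[l.]', '[h-]', '[m-]', '[l-]',
--     '[_+]', '[_-]'
-- }
--
-- def clip_visible(line: str, width: int = LINE_WIDTH) -> str:
--     out = []
--     vis = 0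
--     i = 0
--     while i < len(line) and vis < width:
--         if i + 2 < len(line) and line[i] == '[' and line[i + 1] in 'rgbymcw' and line[i + 2] == '[':
--             j = line.find(']]', i + 3)
--             if j != -1:
--                 payload = line[i + 3:j]
--                 keep = payload[: max(0, width - vis)]
--                 out.append(f"[{line[i + 1]}[{keep}]]")
--                 vis += len(keep)
--                 i = j + 2
--                 continue
--         if line[i] == '[':
--             j = line.find(']', i + 1)
--             if j != -1:
--                 tok = line[i:j + 1]
--                 if tok in ZERO_TOKENS:
--                     out.append(tok)
--                     i = j + 1
--                     continue
--         out.append(line[i])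
--         vis += 1
--         i += 1
--     return ''.join(out)
-- ===== SOURCE B (Python) =====
-- LINE_WIDTH = 38
--
-- ZERO_TOKENS = {
--     '[R]', '[G]', '[Y]', '[B]', '[M]', '[C]', '[W]', '[F]', '[S]', '[N]', '[D]', '[-]', '[n]',
--     '[r]', '[g]', '[y]', '[b]', '[m]', '[c]', '[w]', '[h.]', '[m.]', '[l.]', '[h-]', '[m-]', '[l-]',
--     '[_+]', '[_-]'
-- }
--
--
-- def _tokenize(line):
--     """Width-independent lexer: the whole line as a list of tokens.
--
--     ('s', color, payload)  -- colored span [x[payload]]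
--     ('z', tok)             -- zero-width markup token
--     ('c', ch)              -- ordinary character
--     """
--     toks = []
--     i, n = 0, len(line)
--     while i < n:
--         if (i + 2 < n and line[i] == '[' and line[i + 1] in 'rgbymcw'
--                 and line[i + 2] == '[' and (j := line.find(']]', i + 3)) != -1):
--             toks.append(('s', line[i + 1], line[i + 3:j]))
--             i = j + 2
--         elif line[i] == '[' and (j := line.find(']', i + 1)) != -1 and line[i:j + 1] in ZERO_TOKENS:
--             toks.append(('z', line[i:j + 1]))
--             i = j + 1
--         else:
--             toks.append(('c', line[i]))
--             i += 1
--     return toks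
--
--
-- def clip_visible(line: str, width: int = LINE_WIDTH) -> str:
--     out = []
--     vis = 0
--     for t in _tokenize(line):
--         if vis >= width:
--             break
--         if t[0] == 's':
--             keep = t[2][:width - vis]
--             out.append('[' + t[1] + '[' + keep + ']]')
--             vis += len(keep)
--         elif t[0] == 'z':
--             out.append(t[1])
--         else:
--             out.append(t[1])
--             vis += 1
--     return ''.join(out)
-- ===== Notes on version B (the rewrite author's own statement) =====
-- stated objective: alternative
-- what changed: A's single fused while-loop that matches, clips and emits in one pass is split into a width-independent tokenizer (colored span / zero-width token / plain char) followed by a separate clipping fold over the token list that stops at the visible width.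
import Mathlib
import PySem

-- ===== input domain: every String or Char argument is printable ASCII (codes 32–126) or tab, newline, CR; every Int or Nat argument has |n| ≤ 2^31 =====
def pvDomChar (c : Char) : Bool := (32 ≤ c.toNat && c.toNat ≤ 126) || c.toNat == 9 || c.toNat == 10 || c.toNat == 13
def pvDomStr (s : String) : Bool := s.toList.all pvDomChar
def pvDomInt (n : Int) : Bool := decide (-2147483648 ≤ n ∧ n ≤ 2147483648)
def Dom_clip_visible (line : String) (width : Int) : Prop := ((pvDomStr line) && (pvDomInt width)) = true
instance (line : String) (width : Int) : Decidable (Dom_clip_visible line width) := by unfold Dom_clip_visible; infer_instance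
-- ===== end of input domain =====

-- B replaces A's fused clip loop by a width-independent tokenizer plus a separate clipping fold (idiomatic decomposition; same cost).

-- shared module constant (the Python set ZERO_TOKENS)
def ZERO_TOKENS : PySem.Set (List Char) := PySem.Set.ofList
  ["[R]".toList, "[G]".toList, "[Y]".toList, "[B]".toList, "[M]".toList, "[C]".toList,
   "[W]".toList, "[F]".toList, "[S]".toList, "[N]".toList, "[D]".toList, "[-]".toList,
   "[n]".toList, "[r]".toList, "[g]".toList, "[y]".toList, "[b]".toList, "[m]".toList,
   "[c]".toList, "[w]".toList, "[h.]".toList, "[m.]".toList, "[l.]".toList, "[h-]".toList,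
   "[m-]".toList, "[l-]".toList, "[_+]".toList, "[_-]".toList]

-- ===== PORT A =====
-- A's while loop over index i, ported over the suffix rest = line.drop i (indices i+k become
-- getD k, line.find(..., i+k) becomes Chars.find on rest.drop k shifted back; exact).
-- out.append(chunk) + final ''.join is rendered as emitting the chunk before the recursive call.
def clipLoopA (rest : List Char) (vis width : Int) : List Char :=
  if _h0 : rest.length = 0 then [] else
  if vis < width then
    if _h1 : 2 < rest.length ∧ rest.getD 0 ' ' = '[' ∧ rest.getD 1 ' ' ∈ ['r','g','b','y','m','c','w'] ∧
        rest.getD 2 ' ' = '[' ∧ PySem.Chars.find (rest.drop 3) [']', ']'] ≠ -1 then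
      let payload := (rest.drop 3).take (PySem.Chars.find (rest.drop 3) [']', ']']).toNat
      let keep := PySem.List.slice payload none (some (max 0 (width - vis)))
      '[' :: rest.getD 1 ' ' :: '[' :: (keep ++ ']' :: ']' ::
        clipLoopA (rest.drop ((PySem.Chars.find (rest.drop 3) [']', ']']).toNat + 5)) (vis + keep.length) width)
    else
      if _h2 : rest.getD 0 ' ' = '[' ∧ PySem.Chars.find (rest.drop 1) [']'] ≠ -1 ∧
          rest.take ((PySem.Chars.find (rest.drop 1) [']']).toNat + 2) ∈ ZERO_TOKENS then
        rest.take ((PySem.Chars.find (rest.drop 1) [']']).toNat + 2) ++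
          clipLoopA (rest.drop ((PySem.Chars.find (rest.drop 1) [']']).toNat + 2)) vis width
      else
        rest.getD 0 ' ' :: clipLoopA (rest.drop 1) (vis + 1) width
  else []
termination_by rest.length
decreasing_by all_goals simp [List.length_drop]; omega

def clip_visible (line : String) (width : Int) : String :=
  String.ofList (clipLoopA line.toList 0 width)

-- ===== PORT B =====
inductive Tok where
  | span : Char → List Char → Tok
  | zero : List Char → Tok
  | ch : Char → Tok
deriving DecidableEq, Repr

-- _tokenize of Source B: width-independent lexing of the whole line
def tokenizeB (rest : List Char) : List Tok :=
  if _h0 : rest.length = 0 then [] else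
  if _h1 : 2 < rest.length ∧ rest.getD 0 ' ' = '[' ∧ rest.getD 1 ' ' ∈ ['r','g','b','y','m','c','w'] ∧
      rest.getD 2 ' ' = '[' ∧ PySem.Chars.find (rest.drop 3) [']', ']'] ≠ -1 then
    Tok.span (rest.getD 1 ' ') ((rest.drop 3).take (PySem.Chars.find (rest.drop 3) [']', ']']).toNat) ::
      tokenizeB (rest.drop ((PySem.Chars.find (rest.drop 3) [']', ']']).toNat + 5))
  else
    if _h2 : rest.getD 0 ' ' = '[' ∧ PySem.Chars.find (rest.drop 1) [']'] ≠ -1 ∧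
        rest.take ((PySem.Chars.find (rest.drop 1) [']']).toNat + 2) ∈ ZERO_TOKENS then
      Tok.zero (rest.take ((PySem.Chars.find (rest.drop 1) [']']).toNat + 2)) ::
        tokenizeB (rest.drop ((PySem.Chars.find (rest.drop 1) [']']).toNat + 2))
    else
      Tok.ch (rest.getD 0 ' ') :: tokenizeB (rest.drop 1)
termination_by rest.length
decreasing_by all_goals simp [List.length_drop]; omega

-- the clipping fold of Source B (the for-loop with break)
def renderB (toks : List Tok) (vis width : Int) : List Char :=
  match toks with
  | [] => []
  | t :: ts =>
    if vis < width then
      match t with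
      | .span c payload =>
        let keep := PySem.List.slice payload none (some (width - vis))
        '[' :: c :: '[' :: (keep ++ ']' :: ']' :: renderB ts (vis + keep.length) width)
      | .zero tok => tok ++ renderB ts vis width
      | .ch c => c :: renderB ts (vis + 1) width
    else []

def clip_visible_alt (line : String) (width : Int) : String :=
  String.ofList (renderB (tokenizeB line.toList) 0 width)

-- ===== PRECONDITION & SPEC =====
def Spec_clip_visible (line : String) (width : Int) (out : String) : Prop := out = clip_visible_alt line width
instance (line : String) (width : Int) (out : String) : Decidable (Spec_clip_visible line width out) := by unfold Spec_clip_visible; infer_instance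

-- ===== CLAIM (what is proved, stated in full; the proofs are below) =====
def Claim_equal_clip_visible : Prop := ∀ (line : String) (width : Int), Dom_clip_visible line width → Spec_clip_visible line width (clip_visible line width)

-- ===== LEMMAS AND PROOFS =====
lemma renderB_stop (toks : List Tok) (vis width : Int) (h : ¬ vis < width) :
    renderB toks vis width = [] := by
  cases toks <;> simp [renderB, h]

lemma loop_eq_render (rest : List Char) : ∀ (vis width : Int),
    clipLoopA rest vis width = renderB (tokenizeB rest) vis width := by
  induction rest using tokenizeB.induct with
  | case1 rest h0 => intro vis width; rw [clipLoopA, tokenizeB]; simp [h0, renderB]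
  | case2 rest h0 h1 ih =>
      intro vis width
      by_cases hv : vis < width
      · rw [clipLoopA, tokenizeB]
        simp only [dif_neg h0, dif_pos h1, if_pos hv, renderB]
        have hm : max 0 (width - vis) = width - vis := by omega
        rw [hm, ih]
      · rw [clipLoopA]; simp [h0, hv, renderB_stop]
  | case3 rest h0 h1 h2 ih =>
      intro vis width
      by_cases hv : vis < width
      · rw [clipLoopA, tokenizeB]
        simp only [dif_neg h0, dif_neg h1, dif_pos h2, if_pos hv, renderB]
        rw [ih]
      · rw [clipLoopA]; simp [h0, hv, renderB_stop]
  | case4 rest h0 h1 h2 ih =>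
      intro vis width
      by_cases hv : vis < width
      · rw [clipLoopA, tokenizeB]
        simp only [dif_neg h0, dif_neg h1, dif_neg h2, if_pos hv, renderB]
        rw [ih]
      · rw [clipLoopA]; simp [h0, hv, renderB_stop]

-- ===== VERDICT =====
theorem clip_visible_spec : Claim_equal_clip_visible := by
  intro line width _
  unfold Spec_clip_visible clip_visible clip_visible_alt
  rw [loop_eq_render]
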